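-- pv_equiv track=rewrite | github.com/archivehee/dl_InitGrounder | data/amazon/inter_split.py | build_user_map
-- ===== SOURCE A (Python) =====
-- from typing import Dict, Iterable, List, Sequence, Tuple
--
-- def build_user_map(user_pool: Sequence[str], seen_users: Iterable[str]) -> Dict[str, int]:
--     """Build deterministic user map prioritising the id order from user_pool."""
--     seen = set(seen_users)
--     ordered: List[str] = []
--     for uid in user_pool:
--         if uid in seen:
--             ordered.append(uid)
--             seen.remove(uid)
--     if seen:
--         ordered.extend(sorted(seen))
--     return {uid: idx for idx, uid in enumerate(ordered)}
-- ===== SOURCE B (Python) =====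
-- def build_user_map(user_pool, seen_users):
--     """Build deterministic user map prioritising the id order from user_pool."""
--     rank = {}
--     for idx, uid in enumerate(user_pool):
--         rank.setdefault(uid, idx)
--     fallback = len(user_pool)
--     users = sorted(set(seen_users), key=lambda uid: (rank.get(uid, fallback), uid))
--     return {uid: idx for idx, uid in enumerate(users)}
-- ===== Notes on version B (the rewrite author's own statement) =====
-- stated objective: alternative
-- what changed: A scans the pool appending matches while mutating the seen set and then sorts the leftover tail; B instead builds a first-occurrence rank dictionary over the pool once and produces the whole order with a single keyed sort of the distinct seen users by (rank.get(u, len(pool)), u) (rank-and-sort / decorate-sort), with no append loop and no separate tail.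
import Mathlib
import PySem

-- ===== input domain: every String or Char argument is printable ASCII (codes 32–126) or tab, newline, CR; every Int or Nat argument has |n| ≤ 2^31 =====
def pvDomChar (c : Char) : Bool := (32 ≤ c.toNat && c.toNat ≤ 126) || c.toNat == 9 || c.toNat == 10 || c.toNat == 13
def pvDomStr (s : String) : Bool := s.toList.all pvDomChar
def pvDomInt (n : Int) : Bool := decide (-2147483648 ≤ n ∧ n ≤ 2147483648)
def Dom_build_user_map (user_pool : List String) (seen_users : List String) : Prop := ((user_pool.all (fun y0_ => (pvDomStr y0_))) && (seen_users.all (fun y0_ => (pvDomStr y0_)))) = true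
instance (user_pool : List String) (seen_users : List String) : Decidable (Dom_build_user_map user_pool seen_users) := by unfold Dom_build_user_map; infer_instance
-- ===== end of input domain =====

-- B replaces A's scan-append-then-sort-tail algorithm by rank-and-sort: a first-occurrence rank
-- dictionary over the pool and ONE keyed sort of the distinct seen users by (rank, uid);
-- objective: alternative (same cost, different algorithm).

-- Both Pythons end with the same line `{uid: idx for idx, uid in enumerate(xs)}`; ported once.
def pyEnumDict (xs : List String) : List (String × Int) :=
  ((PySem.List.enumerate xs 0).foldl
    (fun (d : PySem.Dict String Int) p => d.insert p.2 p.1) PySem.Dict.empty).items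

-- ===== PORT A =====
-- `seen.remove(uid)` runs only under `uid in seen`, where it equals Set.discard (no KeyError).
def build_user_map (user_pool : List String) (seen_users : List String) : List (String × Int) :=
  let seen0 : PySem.Set String := PySem.Set.ofList seen_users
  let st := user_pool.foldl
    (fun (st : PySem.Set String × List String) uid =>
      if PySem.Set.contains st.1 uid then (PySem.Set.discard st.1 uid, st.2 ++ [uid]) else st)
    (seen0, [])
  let ordered := if st.1 ≠ [] then st.2 ++ PySem.List.sorted st.1 (fun x => x) false else st.2
  pyEnumDict ordered

-- ===== PORT B =====
def build_user_map_alt (user_pool : List String) (seen_users : List String) : List (String × Int) :=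
  let rank := (PySem.List.enumerate user_pool 0).foldl
    (fun (d : PySem.Dict String Int) p => d.setdefault p.2 p.1) PySem.Dict.empty
  let fallback : Int := (user_pool.length : Int)
  let users := PySem.List.sorted2 (PySem.Set.ofList seen_users)
    (fun uid => rank.getD uid fallback) (fun uid => uid) false
  pyEnumDict users

-- ===== PRECONDITION & SPEC =====
def Spec_build_user_map (user_pool : List String) (seen_users : List String) (out : List (String × Int)) : Prop := out = build_user_map_alt user_pool seen_users
instance (user_pool : List String) (seen_users : List String) (out : List (String × Int)) : Decidable (Spec_build_user_map user_pool seen_users out) := by unfold Spec_build_user_map; infer_instance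

-- ===== CLAIM (what is proved, stated in full; the proofs are below) =====
def Claim_equal_build_user_map : Prop := ∀ (user_pool : List String) (seen_users : List String), Dom_build_user_map user_pool seen_users → Spec_build_user_map user_pool seen_users (build_user_map user_pool seen_users)

-- ===== LEMMAS AND PROOFS =====

-- A's pool pass, described recursively: first occurrences of pool ids still allowed by `s`.
def dedupSel : List String → List String → List String
  | [], _ => []
  | u :: p, s =>
      if PySem.Set.contains s u then u :: dedupSel p (PySem.Set.discard s u)
      else dedupSel p s

-- A's loop computes (leftover set, appended dedupSel output).
theorem loopA_eq (pool : List String) : ∀ (s acc : List String),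
    pool.foldl
      (fun (st : PySem.Set String × List String) uid =>
        if PySem.Set.contains st.1 uid then (PySem.Set.discard st.1 uid, st.2 ++ [uid]) else st)
      (s, acc)
    = (s.filter (fun y => !(dedupSel pool s).contains y), acc ++ dedupSel pool s) := by
  induction pool with
  | nil => intro s acc; simp [dedupSel]
  | cons u p ih =>
      intro s acc
      rw [List.foldl_cons]
      by_cases h : PySem.Set.contains s u = true
      · rw [show (if PySem.Set.contains (s, acc).1 u then
              (PySem.Set.discard (s, acc).1 u, (s, acc).2 ++ [u]) else (s, acc))
            = (PySem.Set.discard s u, acc ++ [u]) from by rw [if_pos h]]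
        rw [ih, show dedupSel (u :: p) s = u :: dedupSel p (PySem.Set.discard s u) from by
          rw [dedupSel, if_pos h]]
        refine congrArg₂ Prod.mk ?_ (by simp)
        simp only [PySem.Set.discard, List.filter_filter]
        refine List.filter_congr (fun y _ => ?_)
        simp only [List.contains_cons]
        rcases hyu : (y == u) <;> simp_all
      · rw [show (if PySem.Set.contains (s, acc).1 u then
              (PySem.Set.discard (s, acc).1 u, (s, acc).2 ++ [u]) else (s, acc)) = (s, acc) from by
            rw [if_neg h]]
        rw [ih, show dedupSel (u :: p) s = dedupSel p s from by rw [dedupSel, if_neg h]]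

theorem mem_dedupSel_left {a : String} : ∀ (p s : List String), a ∈ dedupSel p s → a ∈ s := by
  intro p
  induction p with
  | nil => intro s h; simp [dedupSel] at h
  | cons u q ih =>
      intro s h
      rw [dedupSel] at h
      by_cases hc : PySem.Set.contains s u = true
      · rw [if_pos hc] at h
        rcases List.mem_cons.mp h with h1 | h2
        · subst h1; simpa [PySem.Set.contains] using hc
        · have := ih _ h2
          simp only [PySem.Set.discard, List.mem_filter] at this
          exact this.1
      · rw [if_neg hc] at h
        exact ih _ h

theorem mem_dedupSel_pool {a : String} : ∀ (p s : List String), a ∈ dedupSel p s → a ∈ p := by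
  intro p
  induction p with
  | nil => intro s h; simp [dedupSel] at h
  | cons u q ih =>
      intro s h
      rw [dedupSel] at h
      by_cases hc : PySem.Set.contains s u = true
      · rw [if_pos hc] at h
        rcases List.mem_cons.mp h with h1 | h2
        · exact h1 ▸ List.mem_cons_self
        · exact List.mem_cons_of_mem _ (ih _ h2)
      · rw [if_neg hc] at h
        exact List.mem_cons_of_mem _ (ih _ h)

theorem mem_dedupSel_of {a : String} : ∀ (p s : List String), a ∈ s → a ∈ p → a ∈ dedupSel p s := by
  intro p
  induction p with
  | nil => intro s _ h; simp at h
  | cons u q ih =>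
      intro s hs hp
      rw [dedupSel]
      by_cases hc : PySem.Set.contains s u = true
      · rw [if_pos hc]
        by_cases hau : a = u
        · exact hau ▸ List.mem_cons_self
        · refine List.mem_cons_of_mem _ (ih _ ?_ ?_)
          · simp only [PySem.Set.discard, List.mem_filter]
            exact ⟨hs, by simpa using hau⟩
          · rcases List.mem_cons.mp hp with h1 | h2
            · exact absurd h1 hau
            · exact h2
      · rw [if_neg hc]
        have hau : a ≠ u := by
          intro h; subst h
          exact hc (by simpa [PySem.Set.contains] using hs)
        rcases List.mem_cons.mp hp with h1 | h2
        · exact absurd h1 hau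
        · exact ih _ hs h2

theorem nodup_dedupSel : ∀ (p s : List String), (dedupSel p s).Nodup := by
  intro p
  induction p with
  | nil => intro s; simp [dedupSel]
  | cons u q ih =>
      intro s
      rw [dedupSel]
      by_cases hc : PySem.Set.contains s u = true
      · rw [if_pos hc]
        refine List.nodup_cons.mpr ⟨?_, ih _⟩
        intro hmem
        have := mem_dedupSel_left _ _ hmem
        simp [PySem.Set.discard, List.mem_filter] at this
      · rw [if_neg hc]; exact ih _

-- dedupSel lists pool ids in strictly increasing order of FIRST index in the pool.
theorem pairwise_index_dedupSel : ∀ (p s : List String),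
    (dedupSel p s).Pairwise (fun a b => ∃ k l : Nat,
      PySem.List.index? p a = some k ∧ PySem.List.index? p b = some l ∧ k < l) := by
  intro p
  induction p with
  | nil => intro s; simp [dedupSel]
  | cons u q ih =>
      intro s
      rw [dedupSel]
      by_cases hc : PySem.Set.contains s u = true
      · rw [if_pos hc]
        refine List.pairwise_cons.mpr ⟨?_, ?_⟩
        · intro b hb
          have hbq : b ∈ q := mem_dedupSel_pool _ _ hb
          have hbs : b ∈ PySem.Set.discard s u := mem_dedupSel_left _ _ hb
          have hbu : b ≠ u := by
            simp only [PySem.Set.discard, List.mem_filter] at hbs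
            simpa using hbs.2
          rcases (PySem.List.index?_isSome_iff q b).mpr hbq |> Option.isSome_iff_exists.mp
            with ⟨l, hl⟩
          refine ⟨0, l + 1, PySem.List.index?_cons_self u q, ?_, by omega⟩
          rw [PySem.List.index?_cons_of_ne _ (Ne.symm hbu), hl]
          rfl
        · refine (ih (PySem.Set.discard s u)).imp_of_mem ?_
          intro a b ha hb ⟨k, l, hk, hl, hkl⟩
          have hau : a ≠ u := by
            have := mem_dedupSel_left _ _ ha
            simp only [PySem.Set.discard, List.mem_filter] at this
            simpa using this.2
          have hbu : b ≠ u := by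
            have := mem_dedupSel_left _ _ hb
            simp only [PySem.Set.discard, List.mem_filter] at this
            simpa using this.2
          refine ⟨k + 1, l + 1, ?_, ?_, by omega⟩
          · rw [PySem.List.index?_cons_of_ne _ (by exact fun h => hau h.symm), hk]; rfl
          · rw [PySem.List.index?_cons_of_ne _ (by exact fun h => hbu h.symm), hl]; rfl
      · rw [if_neg hc]
        refine (ih s).imp_of_mem ?_
        intro a b ha hb ⟨k, l, hk, hl, hkl⟩
        have hau : a ≠ u := by
          intro h; subst h
          exact hc (by simpa [PySem.Set.contains] using mem_dedupSel_left _ _ ha)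
        have hbu : b ≠ u := by
          intro h; subst h
          exact hc (by simpa [PySem.Set.contains] using mem_dedupSel_left _ _ hb)
        refine ⟨k + 1, l + 1, ?_, ?_, by omega⟩
        · rw [PySem.List.index?_cons_of_ne _ (by exact fun h => hau h.symm), hk]; rfl
        · rw [PySem.List.index?_cons_of_ne _ (by exact fun h => hbu h.symm), hl]; rfl

-- B's rank dictionary: a setdefault loop over enumerate keeps the FIRST index of each id.
theorem rank_get? : ∀ (p : List String) (s0 : Int) (d : PySem.Dict String Int) (u : String),
    ((PySem.List.enumerate p s0).foldl
      (fun (d : PySem.Dict String Int) q => d.setdefault q.2 q.1) d).get? u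
    = match d.get? u with
      | some v => some v
      | none => (PySem.List.index? p u).map (fun k => s0 + (k : Int)) := by
  intro p
  induction p with
  | nil =>
      intro s0 d u
      simp only [PySem.List.enumerate_nil, List.foldl_nil]
      cases d.get? u <;> simp [PySem.List.index?]
  | cons x q ih =>
      intro s0 d u
      rw [PySem.List.enumerate_cons, List.foldl_cons, ih]
      by_cases hxu : x = u
      · subst hxu
        rw [show (PySem.Dict.setdefault d x s0).get? x = some ((d.get? x).getD s0) from
          PySem.Dict.get?_setdefault_self d x s0]
        cases hd : d.get? x with
        | some v => simp
        | none =>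
            rw [show PySem.List.index? (x :: q) x = some 0 from PySem.List.index?_cons_self x q]
            simp
      · rw [PySem.Dict.get?_setdefault_of_ne d s0 (fun h => hxu h.symm)]
        cases hd : d.get? u with
        | some v => simp
        | none =>
            rw [PySem.List.index?_cons_of_ne _ hxu]
            cases hq : PySem.List.index? q u with
            | none => simp
            | some k =>
                simp only [Option.map_some]
                simp
                omega

-- sorted2 with reverse=False is sorted with the lexicographic pair key.
theorem sorted2_eq_sorted_lex (xs : List String) (k1 : String → Int) (k2 : String → String) :
    PySem.List.sorted2 xs k1 k2 false
    = PySem.List.sorted xs (fun x => toLex (k1 x, k2 x)) false := by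
  simp only [PySem.List.sorted2, PySem.List.sorted]
  have hbefore : (fun a b => decide (k1 a < k1 b)
      || (!decide (k1 b < k1 a) && decide (k2 a < k2 b)))
      = (fun a b => decide ((toLex (k1 a, k2 a) : Lex (Int × String)) < toLex (k1 b, k2 b))) := by
    funext a b
    rcases lt_trichotomy (k1 a) (k1 b) with h | h | h
    · simp [h, Prod.Lex.toLex_lt_toLex]
    · simp [h, Prod.Lex.toLex_lt_toLex]
    · simp [h, not_lt_of_gt h, ne_of_gt h, Prod.Lex.toLex_lt_toLex]
  rw [hbefore]
  simp

-- ===== VERDICT (by name: the statement is the Claim_ definition above) =====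
theorem build_user_map_spec : Claim_equal_build_user_map := by
  intro user_pool seen_users _
  unfold Spec_build_user_map build_user_map build_user_map_alt
  dsimp only []
  rw [loopA_eq]
  set s : List String := PySem.Set.ofList seen_users with hs
  have hsnd : s.Nodup := PySem.Set.nodup_ofList seen_users
  set ds : List String := dedupSel user_pool s with hds
  set leftover : List String := s.filter (fun y => !ds.contains y) with hleft
  set tail : List String := PySem.List.sorted leftover (fun x => x) false with htail
  -- A's ordered list is ds ++ tail in both branches of the `if`.
  have hA : (if leftover ≠ [] then ([] ++ ds) ++ tail else [] ++ ds) = ds ++ tail := by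
    by_cases hl : leftover = []
    · rw [if_neg (by simp [hl])]
      have : tail = [] := by
        rw [htail, hl]
        rfl
      simp [this]
    · rw [if_pos hl]
      simp
  rw [hA]
  -- members of tail are seen ids NOT in the pool
  have htailmem : ∀ b ∈ tail, b ∈ s ∧ b ∉ user_pool := by
    intro b hb
    rw [htail, PySem.List.mem_sorted] at hb
    rw [hleft, List.mem_filter] at hb
    refine ⟨hb.1, fun hbp => ?_⟩
    have : b ∈ ds := hds ▸ mem_dedupSel_of _ _ hb.1 hbp
    simp [this] at hb
  -- rank lookups
  have hrank : ∀ u : String,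
      (((PySem.List.enumerate user_pool 0).foldl
        (fun (d : PySem.Dict String Int) q => d.setdefault q.2 q.1)
        PySem.Dict.empty).getD u (user_pool.length : Int))
      = match PySem.List.index? user_pool u with
        | some k => (k : Int)
        | none => (user_pool.length : Int) := by
    intro u
    rw [PySem.Dict.getD_eq_get?_getD, rank_get? user_pool 0 PySem.Dict.empty u,
      PySem.Dict.get?_empty]
    cases hq : PySem.List.index? user_pool u with
    | none => simp
    | some k => simp
  -- the key function of B
  set key : String → Lex (Int × String) := fun uid =>
    toLex ((((PySem.List.enumerate user_pool 0).foldl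
      (fun (d : PySem.Dict String Int) q => d.setdefault q.2 q.1)
      PySem.Dict.empty).getD uid (user_pool.length : Int)), uid) with hkey
  -- ds ++ tail is a permutation of s
  have hperm : (ds ++ tail).Perm s := by
    have h1 : ds.Perm (s.filter (fun y => ds.contains y)) := by
      rw [List.perm_ext_iff_of_nodup (hds ▸ nodup_dedupSel user_pool s) (hsnd.filter _)]
      intro a
      simp only [List.mem_filter]
      constructor
      · intro ha
        exact ⟨mem_dedupSel_left user_pool s (hds ▸ ha), by simpa using ha⟩
      · intro ⟨_, ha⟩
        simpa using ha
    have h2 : tail.Perm leftover := htail ▸ PySem.List.sorted_perm leftover (fun x => x) false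
    exact ((h1.append h2).trans (List.filter_append_perm _ s))
  -- the target list has strictly increasing keys
  have hpair : (ds ++ tail).Pairwise (fun a b => key a < key b) := by
    rw [List.pairwise_append]
    refine ⟨?_, ?_, ?_⟩
    · refine (hds ▸ pairwise_index_dedupSel user_pool s).imp_of_mem ?_
      intro a b _ _ ⟨k, l, hk, hl, hkl⟩
      rw [hkey]
      simp only [hrank a, hrank b, hk, hl]
      rw [Prod.Lex.toLex_lt_toLex]
      left
      show (k : Int) < (l : Int)
      exact_mod_cast hkl
    · have hlnd : leftover.Nodup := by rw [hleft]; exact hsnd.filter _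
      have hnd : tail.Nodup :=
        ((PySem.List.sorted_perm leftover (fun x => x) false).symm).nodup hlnd
      have hle : tail.Pairwise (fun a b : String => a ≤ b) :=
        htail ▸ PySem.List.sorted_pairwise leftover (fun x => x)
      refine ((hle.and hnd).imp_of_mem ?_)
      intro a b ha hb ⟨h1, h2⟩
      have hna : PySem.List.index? user_pool a = none :=
        (PySem.List.index?_eq_none_iff _ _).mpr (htailmem a ha).2
      have hnb : PySem.List.index? user_pool b = none :=
        (PySem.List.index?_eq_none_iff _ _).mpr (htailmem b hb).2
      rw [hkey]
      simp only [hrank a, hrank b, hna, hnb]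
      rw [Prod.Lex.toLex_lt_toLex]
      right
      exact ⟨rfl, lt_of_le_of_ne h1 h2⟩
    · intro a ha b hb
      have hap : a ∈ user_pool := mem_dedupSel_pool user_pool s (hds ▸ ha)
      rcases Option.isSome_iff_exists.mp
        ((PySem.List.index?_isSome_iff user_pool a).mpr hap) with ⟨k, hk⟩
      have hkb : k < user_pool.length := by
        rcases PySem.List.getElem_of_index?_eq_some hk with ⟨hlt, _, _⟩
        exact hlt
      have hnb : PySem.List.index? user_pool b = none :=
        (PySem.List.index?_eq_none_iff _ _).mpr (htailmem b hb).2
      rw [hkey]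
      simp only [hrank a, hrank b, hk, hnb]
      rw [Prod.Lex.toLex_lt_toLex]
      left
      show (k : Int) < (user_pool.length : Int)
      exact_mod_cast hkb
  -- B's single sort produces exactly ds ++ tail
  rw [sorted2_eq_sorted_lex]
  rw [PySem.List.sorted_eq_of_perm_of_pairwise_lt s (ds ++ tail) key hperm hpair]
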